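-- pv_equiv track=rewrite | github.com/gujizhang/QCA_public | QCA-now_version/gen_class_qc.py | cross_gen
-- ===== SOURCE A (Python) =====
-- def cross_gen(mutate_i, mutate_j, mutate_z):
--     """
--     执行基因交叉操作
--
--     输入参数:
--         mutate_i: list, 需要进行交叉的目标量子电路参数列表
--         mutate_j: list, 需要进行交叉的目标量子电路参数列表
--         mutate_z: list, 需要进行交叉的目标量子电路参数列表
--     返回值:
--         list: 交叉后的量子电路参数列表
--     """
--     # 执行按位置的交叉，根据图中的逻辑
--     circuits = [mutate_i, mutate_j, mutate_z]
--     params_len = len(circuits[0])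
--
--     # 创建新的解决方案
--     new_circuits = [[], [], []]
--
--     # 按照示例模式进行交叉
--     for i in range(params_len):
--         # 位置模式: 0,1,2,0,1,2,0,1,2
--         pos = i % 3
--
--         # A: A1,C2,B3,A4,C5,B6,A7,C8,B9
--         if pos == 0:  # 位置1,4,7
--             new_circuits[0].append(circuits[0][i])  # A取自A
--         elif pos == 1:  # 位置2,5,8
--             new_circuits[0].append(circuits[2][i])  # A取自C
--         else:  # 位置3,6,9
--             new_circuits[0].append(circuits[1][i])  # A取自B
--
--         # B: B1,A2,C3,B4,A5,C6,B7,A8,C9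
--         if pos == 0:  # 位置1,4,7
--             new_circuits[1].append(circuits[1][i])  # B取自B
--         elif pos == 1:  # 位置2,5,8
--             new_circuits[1].append(circuits[0][i])  # B取自A
--         else:  # 位置3,6,9
--             new_circuits[1].append(circuits[2][i])  # B取自C
--
--         # C: C1,B2,A3,C4,B5,A6,C7,B8,A9
--         if pos == 0:  # 位置1,4,7
--             new_circuits[2].append(circuits[2][i])  # C取自C
--         elif pos == 1:  # 位置2,5,8
--             new_circuits[2].append(circuits[1][i])  # C取自B
--         else:  # 位置3,6,9
--             new_circuits[2].append(circuits[0][i])  # C取自A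
--
--     return new_circuits
-- ===== SOURCE B (Python) =====
-- def cross_gen(mutate_i, mutate_j, mutate_z):
--     """Three-way positional crossover built by strided slice passes: each output
--     row starts as a zero buffer and is filled phase by phase with the extended
--     slice assignment row[p::3] = src[p:n:3]; the schedule of source lists is
--     rotated right between output rows instead of selecting per element."""
--     n = len(mutate_i)
--     order = [mutate_i, mutate_z, mutate_j]   # phase sources for the first output row
--     new_circuits = []
--     for _ in range(3):
--         row = [0] * n
--         for p, src in enumerate(order):
--             row[p::3] = src[p:n:3]
--         new_circuits.append(row)
--         order = [order[-1]] + order[:-1]     # rotate right: schedule for the next row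
--     return new_circuits
-- ===== Notes on version B (the rewrite author's own statement) =====
-- stated objective: alternative
-- what changed: Instead of one per-element loop with a nine-branch if/elif cascade appending into three accumulators, B builds each output row as a zero buffer filled by three strided slice passes (row[p::3] = src[p:n:3]) over a source schedule that is rotated right between rows.
import Mathlib
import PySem

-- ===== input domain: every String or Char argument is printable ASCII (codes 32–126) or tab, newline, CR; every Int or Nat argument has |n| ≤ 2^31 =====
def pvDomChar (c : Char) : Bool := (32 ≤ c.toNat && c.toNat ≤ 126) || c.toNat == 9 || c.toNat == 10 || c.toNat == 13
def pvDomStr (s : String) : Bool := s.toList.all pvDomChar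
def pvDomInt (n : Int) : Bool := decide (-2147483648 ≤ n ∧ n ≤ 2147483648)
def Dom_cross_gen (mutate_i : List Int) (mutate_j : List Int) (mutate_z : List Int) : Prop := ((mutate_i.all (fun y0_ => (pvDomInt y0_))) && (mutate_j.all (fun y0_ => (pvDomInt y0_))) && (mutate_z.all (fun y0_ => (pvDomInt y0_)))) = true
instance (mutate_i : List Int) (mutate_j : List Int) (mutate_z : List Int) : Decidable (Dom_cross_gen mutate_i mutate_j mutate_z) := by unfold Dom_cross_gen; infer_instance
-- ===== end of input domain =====

-- B rebuilds each output row by strided slice passes (row[p::3] = src[p:n:3]) over a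
-- rotating source schedule instead of A's per-element nine-branch cascade (objective: alternative).

-- ===== PORT A =====
-- circuits[k][i] evaluated under Pre_ (both indices in range there); default is never reached inside Pre_
def pvSel (circuits : List (List Int)) (k : Int) (i : Int) : Int :=
  (PySem.List.pyGet? ((PySem.List.pyGet? circuits k).getD []) i).getD 0

def cross_gen (mutate_i : List Int) (mutate_j : List Int) (mutate_z : List Int) : List (List Int) :=
  let circuits := [mutate_i, mutate_j, mutate_z]
  let params_len := mutate_i.length
  let nc := (PySem.List.pyRange 0 params_len 1).foldl
    (fun (nc : List Int × List Int × List Int) i =>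
      let pos := PySem.Int.mod i 3
      let a0 := if pos = 0 then pvSel circuits 0 i else if pos = 1 then pvSel circuits 2 i else pvSel circuits 1 i
      let a1 := if pos = 0 then pvSel circuits 1 i else if pos = 1 then pvSel circuits 0 i else pvSel circuits 2 i
      let a2 := if pos = 0 then pvSel circuits 2 i else if pos = 1 then pvSel circuits 1 i else pvSel circuits 0 i
      (nc.1 ++ [a0], nc.2.1 ++ [a1], nc.2.2 ++ [a2]))
    ([], [], [])
  [nc.1, nc.2.1, nc.2.2]

-- ===== PORT B =====
-- hand port of the extended-slice assignment row[p::3] = vals (exact for 0 ≤ p when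
-- len(vals) = len(row[p::3]), which Pre_ guarantees; Python raises ValueError otherwise)
def pvStrideWrite (row : List Int) (p : Nat) (vals : List Int) : List Int :=
  match vals with
  | [] => row
  | v :: vs => pvStrideWrite (row.set p v) (p + 3) vs

-- one output row: row = [0]*n; for p, src in enumerate(order): row[p::3] = src[p:n:3]
def pvRow (order : List (List Int)) (n : Nat) : List Int :=
  (PySem.List.enumerate order 0).foldl
    (fun row ps => pvStrideWrite row ps.1.toNat ((PySem.List.slice? ps.2 (some ps.1) (some (n : Int)) 3).getD []))
    (List.replicate n 0)

def cross_gen_alt (mutate_i : List Int) (mutate_j : List Int) (mutate_z : List Int) : List (List Int) :=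
  let n := mutate_i.length
  let res := (PySem.List.pyRange 0 3 1).foldl
    (fun (st : List (List Int) × List (List Int)) _ =>
      (st.1 ++ [pvRow st.2 n], (PySem.List.pyGet? st.2 (-1)).getD [] :: st.2.dropLast))
    ([], [mutate_i, mutate_z, mutate_j])
  res.1

-- ===== PRECONDITION & SPEC =====
-- Pre_ excludes inputs where mutate_j or mutate_z is shorter than mutate_i: there A raises
-- IndexError on circuits[...][i] (and B raises ValueError on the slice assignment).
def Pre_cross_gen (mutate_i : List Int) (mutate_j : List Int) (mutate_z : List Int) : Prop :=
  mutate_i.length ≤ mutate_j.length ∧ mutate_i.length ≤ mutate_z.length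
instance (mutate_i : List Int) (mutate_j : List Int) (mutate_z : List Int) : Decidable (Pre_cross_gen mutate_i mutate_j mutate_z) := by unfold Pre_cross_gen; infer_instance

def pvWitness_cross_gen : List Int × List Int × List Int := ([1, 2, 3, 4], [10, 20, 30, 40], [100, 200, 300, 400])

def Spec_cross_gen (mutate_i : List Int) (mutate_j : List Int) (mutate_z : List Int) (out : List (List Int)) : Prop := out = cross_gen_alt mutate_i mutate_j mutate_z
instance (mutate_i : List Int) (mutate_j : List Int) (mutate_z : List Int) (out : List (List Int)) : Decidable (Spec_cross_gen mutate_i mutate_j mutate_z out) := by unfold Spec_cross_gen; infer_instance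

-- ===== CLAIM (what is proved, stated in full; the proofs are below) =====
def Claim_equal_cross_gen : Prop := ∀ (mutate_i : List Int) (mutate_j : List Int) (mutate_z : List Int), Dom_cross_gen mutate_i mutate_j mutate_z → Pre_cross_gen mutate_i mutate_j mutate_z → Spec_cross_gen mutate_i mutate_j mutate_z (cross_gen mutate_i mutate_j mutate_z)

-- ===== LEMMAS AND PROOFS =====

-- common normal form of one output row: position i takes from s0/s1/s2 by i % 3
def pvNF (s0 s1 s2 : List Int) (n : Nat) : List Int :=
  (List.range n).map (fun i =>
    if i % 3 = 0 then s0.getD i 0 else if i % 3 = 1 then s1.getD i 0 else s2.getD i 0)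

-- A's accumulator fold splits into three independent maps
theorem pv_fold_three (l : List Int) (f g h : Int → Int) (a b c : List Int) :
    l.foldl (fun (nc : List Int × List Int × List Int) i =>
        (nc.1 ++ [f i], nc.2.1 ++ [g i], nc.2.2 ++ [h i])) (a, b, c)
      = (a ++ l.map f, b ++ l.map g, c ++ l.map h) := by
  induction l generalizing a b c with
  | nil => simp
  | cons x xs ih => simp [List.foldl_cons, ih]

-- pvSel on the concrete 3-list of circuits with a natural element index
theorem pvSel_zero (a b c : List Int) (k : Nat) :
    pvSel [a, b, c] 0 (k : Int) = a.getD k 0 := by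
  simp [pvSel, List.getD_eq_getElem?_getD]

theorem pvSel_one (a b c : List Int) (k : Nat) :
    pvSel [a, b, c] 1 (k : Int) = b.getD k 0 := by
  simp [pvSel, List.getD_eq_getElem?_getD]

theorem pvSel_two (a b c : List Int) (k : Nat) :
    pvSel [a, b, c] 2 (k : Int) = c.getD k 0 := by
  simp [pvSel, List.getD_eq_getElem?_getD]

-- A's result in normal form (unconditional: out-of-range reads default to 0 on both sides)
theorem cross_gen_eq_NF (mi mj mz : List Int) :
    cross_gen mi mj mz =
      [pvNF mi mz mj mi.length, pvNF mj mi mz mi.length, pvNF mz mj mi mi.length] := by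
  simp only [cross_gen, pv_fold_three, List.nil_append]
  rw [PySem.List.pyRange_one (0 : Int) (mi.length : Int)]
  simp only [Int.sub_zero, Int.toNat_natCast, List.map_map, pvNF]
  refine congrArg₂ _ ?_ (congrArg₂ _ ?_ (congrArg₂ _ ?_ rfl)) <;>
    refine List.map_congr_left (fun k _ => ?_) <;>
    · show (fun i => _) ((0 : Int) + (k : Int)) = _
      have h3 : k % 3 = 0 ∨ k % 3 = 1 ∨ k % 3 = 2 := by omega
      simp only [Int.zero_add]
      rcases h3 with h | h | h <;> rw [h] <;>
        simp [pvSel_zero, pvSel_one, pvSel_two, List.getD_eq_getElem?_getD] <;>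
        first
          | (intro hd; exact absurd (by omega : (3 : Int) ∣ (k : Int)) hd)
          | (rw [if_neg (by omega : ¬ (3 : Int) ∣ (k : Int)),
                 if_pos (by omega : ((k : Int)) % 3 = 1)])
          | (rw [if_neg (by omega : ¬ (3 : Int) ∣ (k : Int)),
                 if_neg (by omega : ¬ ((k : Int)) % 3 = 1)])

-- the extended-slice read src[p:n:3] for natural p, n with n ≤ len(src)
theorem pv_slice3 (src : List Int) (p n : Nat) (hn : n ≤ src.length) :
    PySem.List.slice? src (some (p : Int)) (some (n : Int)) 3 =
      some ((List.range ((n - p + 2) / 3)).map (fun k => src.getD (p + 3 * k) 0)) := by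
  have hp0 : ¬ ((p : Int) < 0) := by omega
  have hn0 : ¬ ((n : Int) < 0) := by omega
  have hstop : min (n : Int) (src.length : Int) = (n : Int) := by omega
  simp only [PySem.List.slice?, PySem.List.sliceIndices, hp0, hn0, if_false]
  norm_num [hstop]
  by_cases hpn : p < n
  · have hstart : min ((p : Int)) ((src.length : Int)) = (p : Int) := by omega
    rw [hstart, if_pos (Or.inl hpn : p < n ∨ src.length < n)]
    have h1 : ((n : Int) - p + 3 - 1) = ((n - p + 2 : Nat) : Int) := by omega
    have hcnt : (((n : Int) - p + 3 - 1) / 3).toNat = (n - p + 2) / 3 := by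
      rw [h1]
      norm_cast
    rw [hcnt]
    have hcongr : ∀ k ∈ List.range ((n - p + 2) / 3),
        src[((p : Int) + 3 * (k : Int)).toNat]? = some (src.getD (p + 3 * k) 0) := by
      intro k hk
      rw [List.mem_range] at hk
      have hidx : ((p : Int) + 3 * (k : Int)).toNat = p + 3 * k := by omega
      have hlt : p + 3 * k < src.length := by omega
      rw [hidx, List.getElem?_eq_getElem hlt, List.getD_eq_getElem _ _ hlt]
    rw [List.filterMap_congr hcongr]
    simp
  · have hc0 : (n - p + 2) / 3 = 0 := by omega
    rw [hc0, if_neg (by omega : ¬ (p < n ∨ src.length < n))]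
    simp

-- writing src[p:n:3] into row at stride 3 from offset p: pointwise description
theorem pv_fill (src : List Int) (n : Nat) :
    ∀ c p row, (n - p + 2) / 3 = c → n ≤ row.length →
      (pvStrideWrite row p ((List.range ((n - p + 2) / 3)).map (fun k => src.getD (p + 3 * k) 0))).length = row.length ∧
      ∀ i, (pvStrideWrite row p ((List.range ((n - p + 2) / 3)).map (fun k => src.getD (p + 3 * k) 0))).getD i 0 =
        if p ≤ i ∧ i < n ∧ (i - p) % 3 = 0 then src.getD i 0 else row.getD i 0 := by
  intro c
  induction c with
  | zero =>
    intro p row hc hlen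
    have hpn : n ≤ p := by omega
    constructor
    · rw [hc]; simp [pvStrideWrite]
    · intro i
      rw [hc]
      simp only [List.range_zero, List.map_nil, pvStrideWrite]
      rw [if_neg (by omega)]
  | succ c ih =>
    intro p row hc hlen
    have hpn : p < n := by omega
    have htail : (n - (p + 3) + 2) / 3 = c := by omega
    have hvals : (List.range ((n - p + 2) / 3)).map (fun k => src.getD (p + 3 * k) 0)
        = src.getD p 0 ::
          (List.range ((n - (p + 3) + 2) / 3)).map (fun k => src.getD ((p + 3) + 3 * k) 0) := by
      rw [hc, htail, List.range_succ_eq_map, List.map_cons, List.map_map]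
      refine congrArg₂ _ (by norm_num) (List.map_congr_left fun k _ => ?_)
      show src.getD (p + 3 * (k + 1)) 0 = src.getD (p + 3 + 3 * k) 0
      congr 1; omega
    rw [hvals]
    simp only [pvStrideWrite]
    have hlen' : n ≤ (row.set p (src.getD p 0)).length := by
      rw [List.length_set]; exact hlen
    obtain ⟨ihlen, ihget⟩ := ih (p + 3) (row.set p (src.getD p 0)) htail hlen'
    refine ⟨by rw [ihlen, List.length_set], fun i => ?_⟩
    rw [ihget i]
    have hset : (row.set p (src.getD p 0)).getD i 0
        = if i = p then src.getD p 0 else row.getD i 0 := by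
      by_cases hip : i = p
      · subst hip
        rw [if_pos rfl, List.getD_eq_getElem?_getD, List.getElem?_set_self (by omega)]
        rfl
      · rw [if_neg hip, List.getD_eq_getElem?_getD, List.getElem?_set_ne (by omega),
            ← List.getD_eq_getElem?_getD]
    rw [hset]
    by_cases hip : i = p
    · subst hip
      rw [if_neg (by omega), if_pos rfl, if_pos (by omega)]
    · split_ifs with h1 h2 h2 <;> first | rfl | (exfalso; omega)

-- one pass of pvRow: three strided fills produce the normal-form row
theorem pvRow_eq (s0 s1 s2 : List Int) (n : Nat)
    (h0 : n ≤ s0.length) (h1 : n ≤ s1.length) (h2 : n ≤ s2.length) :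
    pvRow [s0, s1, s2] n = pvNF s0 s1 s2 n := by
  have henum : PySem.List.enumerate ([s0, s1, s2] : List (List Int)) 0
      = [(0, s0), (1, s1), (2, s2)] := by
    simp [PySem.List.enumerate_cons, PySem.List.enumerate_nil]
  have hbase : ∀ i, (List.replicate n (0 : Int)).getD i 0 = 0 := by
    intro i
    rw [List.getD_eq_getElem?_getD]
    by_cases hi : i < n
    · rw [List.getElem?_replicate_of_lt hi]; rfl
    · rw [List.getElem?_eq_none (by simpa using hi)]; rfl
  have hs0 : PySem.List.slice? s0 (some (0 : Int)) (some (n : Int)) 3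
      = some ((List.range ((n - 0 + 2) / 3)).map (fun k => s0.getD (0 + 3 * k) 0)) := by
    exact_mod_cast pv_slice3 s0 0 n h0
  have hs1 : PySem.List.slice? s1 (some (1 : Int)) (some (n : Int)) 3
      = some ((List.range ((n - 1 + 2) / 3)).map (fun k => s1.getD (1 + 3 * k) 0)) := by
    exact_mod_cast pv_slice3 s1 1 n h1
  have hs2 : PySem.List.slice? s2 (some (2 : Int)) (some (n : Int)) 3
      = some ((List.range ((n - 2 + 2) / 3)).map (fun k => s2.getD (2 + 3 * k) 0)) := by
    exact_mod_cast pv_slice3 s2 2 n h2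
  simp only [pvRow, henum, List.foldl_cons, List.foldl_nil]
  rw [hs0, hs1, hs2]
  simp only [Option.getD_some, Int.toNat_zero, Int.toNat_one,
    show (2 : Int).toNat = 2 from rfl]
  obtain ⟨len1, get1⟩ := pv_fill s0 n ((n - 0 + 2) / 3) 0 (List.replicate n 0) rfl
    (by rw [List.length_replicate])
  obtain ⟨len2, get2⟩ := pv_fill s1 n ((n - 1 + 2) / 3) 1 _ rfl (by rw [len1, List.length_replicate])
  obtain ⟨len3, get3⟩ := pv_fill s2 n ((n - 2 + 2) / 3) 2 _ rfl
    (by rw [len2, len1, List.length_replicate])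
  refine List.ext_getElem (by rw [len3, len2, len1, List.length_replicate, pvNF,
    List.length_map, List.length_range]) (fun i hia hib => ?_)
  have hin : i < n := by
    have := hia; rw [len3, len2, len1, List.length_replicate] at this; exact this
  rw [← List.getD_eq_getElem _ 0 hia, ← List.getD_eq_getElem _ 0 hib]
  rw [get3 i, get2 i, get1 i, hbase i]
  have hnf : (pvNF s0 s1 s2 n).getD i 0
      = if i % 3 = 0 then s0.getD i 0 else if i % 3 = 1 then s1.getD i 0 else s2.getD i 0 := by
    simp only [pvNF, List.getD_eq_getElem?_getD]
    rw [List.getElem?_map, List.getElem?_range hin]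
    rfl
  rw [hnf]
  rcases (by omega : i % 3 = 0 ∨ i % 3 = 1 ∨ i % 3 = 2) with h | h | h <;>
    split_ifs <;> first | rfl | (exfalso; omega)

-- B's result in normal form, under Pre_
theorem cross_gen_alt_eq_NF (mi mj mz : List Int)
    (hj : mi.length ≤ mj.length) (hz : mi.length ≤ mz.length) :
    cross_gen_alt mi mj mz =
      [pvNF mi mz mj mi.length, pvNF mj mi mz mi.length, pvNF mz mj mi mi.length] := by
  have h3 : PySem.List.pyRange 0 3 1 = [0, 1, 2] := by decide
  simp [cross_gen_alt, h3, PySem.List.pyGet?_neg_one,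
    pvRow_eq mi mz mj mi.length le_rfl hz hj,
    pvRow_eq mj mi mz mi.length hj le_rfl hz,
    pvRow_eq mz mj mi mi.length hz hj le_rfl]

-- ===== VERDICT (by name: the statement is the Claim_ definition above) =====
theorem cross_gen_spec : Claim_equal_cross_gen := by
  intro mi mj mz _ hpre
  unfold Spec_cross_gen
  rw [cross_gen_eq_NF, cross_gen_alt_eq_NF mi mj mz hpre.1 hpre.2]
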